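-- pv_equiv track=rewrite | github.com/EliecerAAguilar/monte_carlo_PF | CodigoPY/ejemplo01.py | tiempo_reparacion_y
-- ===== SOURCE A (Python) =====
-- from typing import List
--
-- def tiempo_reparacion_y(nums: List[int | float]) -> List[int | float]:
--     """
--     Funciones de calculo de 'Y' de reparacion
--     Funcion que asigna la 'Y' de los tiempos de descompostura
--     :param nums: lista
--     :type nums:  List[int | float]
--     :return: una lista de enteros o flotantes
--     :rtype: List[int | float]
--     """
--     lista = list()
--     for i in range(1, 101):
--         if i <= 3:
--             lista.append(nums[0])
--         elif i <= 7:
--             lista.append(nums[1])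
--         elif i <= 18:
--             lista.append(nums[2])
--         elif i <= 40:
--             lista.append(nums[3])
--         elif i <= 59:
--             lista.append(nums[4])
--         elif i <= 75:
--             lista.append(nums[5])
--         elif i <= 86:
--             lista.append(nums[6])
--         elif i <= 93:
--             lista.append(nums[7])
--         elif i <= 97:
--             lista.append(nums[8])
--         elif i <= 99:
--             lista.append(nums[9])
--         else:
--             lista.append(nums[10])
--     return lista
-- ===== SOURCE B (Python) =====
-- from typing import List
--
-- # Counts of how many of the 100 slots each of the 11 values occupies
-- # (segment widths of A's cascading thresholds: 3,7,18,40,59,75,86,93,97,99,100).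
-- _COUNTS = [3, 4, 11, 22, 19, 16, 11, 7, 4, 2, 1]
--
-- def tiempo_reparacion_y(nums: List[int | float]) -> List[int | float]:
--     lista = []
--     for idx, count in enumerate(_COUNTS):
--         lista.extend([nums[idx]] * count)
--     return lista
-- ===== Notes on version B (the rewrite author's own statement) =====
-- stated objective: simpler
-- what changed: Replaced the 100-iteration loop with an 11-way cascaded threshold test by a single pass over an 11-entry counts table, emitting each value with list repetition.
import Mathlib
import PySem

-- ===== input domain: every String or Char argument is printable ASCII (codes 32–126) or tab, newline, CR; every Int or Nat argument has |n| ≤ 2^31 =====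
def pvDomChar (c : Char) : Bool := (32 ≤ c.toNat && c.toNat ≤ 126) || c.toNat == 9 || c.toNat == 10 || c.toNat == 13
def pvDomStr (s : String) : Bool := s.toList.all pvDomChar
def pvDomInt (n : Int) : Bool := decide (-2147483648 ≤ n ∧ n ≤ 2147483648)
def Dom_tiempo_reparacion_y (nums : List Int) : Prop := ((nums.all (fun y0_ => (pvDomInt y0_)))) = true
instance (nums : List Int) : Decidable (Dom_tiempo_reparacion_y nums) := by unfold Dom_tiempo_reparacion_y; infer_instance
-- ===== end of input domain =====

-- B replaces A's 100-iteration loop of cascaded threshold tests by one pass over an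
-- 11-entry counts table (simpler decomposition, same result).

-- ===== PORT A =====
-- for i in range(1, 101): cascaded thresholds pick nums[k] for each i
def tiempo_reparacion_y (nums : List Int) : List Int :=
  (PySem.List.pyRange 1 101 1).foldl (fun lista i =>
    lista ++ [if i ≤ 3 then PySem.List.pyGetD nums 0 0
      else if i ≤ 7 then PySem.List.pyGetD nums 1 0
      else if i ≤ 18 then PySem.List.pyGetD nums 2 0
      else if i ≤ 40 then PySem.List.pyGetD nums 3 0
      else if i ≤ 59 then PySem.List.pyGetD nums 4 0
      else if i ≤ 75 then PySem.List.pyGetD nums 5 0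
      else if i ≤ 86 then PySem.List.pyGetD nums 6 0
      else if i ≤ 93 then PySem.List.pyGetD nums 7 0
      else if i ≤ 97 then PySem.List.pyGetD nums 8 0
      else if i ≤ 99 then PySem.List.pyGetD nums 9 0
      else PySem.List.pyGetD nums 10 0]) []

-- ===== PORT B =====
def pvCounts : List Int := [3, 4, 11, 22, 19, 16, 11, 7, 4, 2, 1]

-- for idx, count in enumerate(_COUNTS): lista.extend([nums[idx]] * count)
def tiempo_reparacion_y_alt (nums : List Int) : List Int :=
  (PySem.List.enumerate pvCounts).foldl (fun lista p =>
    lista ++ List.replicate p.2.toNat (PySem.List.pyGetD nums p.1 0)) []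

-- ===== PRECONDITION & SPEC =====
-- Pre_ excludes lists shorter than 11, on which both Pythons raise IndexError.
def Pre_tiempo_reparacion_y (nums : List Int) : Prop := 11 ≤ nums.length
instance (nums : List Int) : Decidable (Pre_tiempo_reparacion_y nums) := by
  unfold Pre_tiempo_reparacion_y; infer_instance

def pvWitness_tiempo_reparacion_y : List Int := [1, 2, 3, 4, 5, 6, 7, 8, 9, 10, 11]

def Spec_tiempo_reparacion_y (nums : List Int) (out : List Int) : Prop := out = tiempo_reparacion_y_alt nums
instance (nums : List Int) (out : List Int) : Decidable (Spec_tiempo_reparacion_y nums out) := by unfold Spec_tiempo_reparacion_y; infer_instance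

-- ===== CLAIM (what is proved, stated in full; the proofs are below) =====
def Claim_equal_tiempo_reparacion_y : Prop := ∀ (nums : List Int), Dom_tiempo_reparacion_y nums → Pre_tiempo_reparacion_y nums → Spec_tiempo_reparacion_y nums (tiempo_reparacion_y nums)

-- ===== LEMMAS AND PROOFS =====

-- Both ports fully evaluate to the same explicit concatenation of pyGetD terms.
theorem tiempo_reparacion_y_eq_alt (nums : List Int) :
    tiempo_reparacion_y nums = tiempo_reparacion_y_alt nums := by
  norm_num [tiempo_reparacion_y, tiempo_reparacion_y_alt, pvCounts,
        PySem.List.pyRange, PySem.List.enumerate, List.foldl]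
  rfl

-- ===== VERDICT (by name: the statement is the Claim_ definition above) =====
theorem tiempo_reparacion_y_spec : Claim_equal_tiempo_reparacion_y := by
  intro nums _ _
  exact tiempo_reparacion_y_eq_alt nums
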